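-- pv_equiv track=rewrite | github.com/robertchase/spindrift | spindrift/string_util.py | un_comment
-- ===== SOURCE A (Python) =====
-- def un_comment(s, comment='#'):
--     """ uncomment a string
--
--         truncate s at first occurrence of a non-escaped comment character
--
--         remove escapes from escaped comment characters
--
--         don't use when speed is important
--     """
--     escape = '\\'
--     is_escape = False
--     result = ''
--     for c in s:
--         if c == comment:
--             if is_escape:
--                 is_escape = False
--             else:
--                 return result
--         if is_escape:
--             result += escape
--         if c == escape:
--             is_escape = True
--         else:
--             is_escape = False
--             result += c
--     return result
-- ===== SOURCE B (Python) =====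
-- def un_comment(s, comment='#'):
--     """uncomment a string: index-based lookahead parser instead of an escape-flag DFA"""
--     escape = '\\'
--     out = []
--     i, n = 0, len(s)
--     while i < n:
--         c = s[i]
--         if c == comment:
--             return ''.join(out)
--         if c == escape:
--             if i + 1 < n:
--                 if s[i + 1] == comment:
--                     out.append(s[i + 1])
--                     i += 2
--                 else:
--                     out.append(escape)
--                     i += 1
--             else:
--                 i += 1
--         else:
--             out.append(c)
--             i += 1
--     return ''.join(out)
-- ===== Notes on version B (the rewrite author's own statement) =====
-- stated objective: alternative
-- what changed: Replaces A's lazy escape-flag DFA (state carried across iterations, backslash emitted one step late) with an index-based lookahead parser that decides each backslash immediately by peeking at the next character, building a list and joining it.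
import Mathlib
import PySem

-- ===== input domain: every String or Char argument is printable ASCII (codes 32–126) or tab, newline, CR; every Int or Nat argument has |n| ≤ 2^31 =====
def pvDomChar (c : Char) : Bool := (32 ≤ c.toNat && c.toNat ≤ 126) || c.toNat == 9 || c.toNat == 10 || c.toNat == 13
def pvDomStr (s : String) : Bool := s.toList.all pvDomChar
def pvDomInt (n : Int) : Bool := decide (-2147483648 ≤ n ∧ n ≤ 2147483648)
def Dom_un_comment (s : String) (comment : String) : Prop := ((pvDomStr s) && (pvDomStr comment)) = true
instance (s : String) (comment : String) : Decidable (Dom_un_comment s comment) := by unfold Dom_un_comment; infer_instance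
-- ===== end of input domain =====

-- B replaces A's escape-flag DFA by an index-based lookahead parser (same cost, different decomposition).

-- ===== PORT A =====
-- A's loop: state (is_escape, result); 'c == comment' compares the 1-char string [c] with comment.
def unCommentGoA (cm : List Char) : List Char → Bool → List Char → List Char
  | [], _, res => res
  | c :: rest, esc, res =>
    if [c] = cm ∧ ¬ esc then res          -- 'return result' on unescaped comment char
    else
      let esc1 := if [c] = cm then false else esc    -- escaped comment: clear the flag
      let res1 := if esc1 then res ++ ['\\'] else res -- emit the pending escape lazily
      if c = '\\' then unCommentGoA cm rest true res1
      else unCommentGoA cm rest false (res1 ++ [c])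

def un_comment (s : String) (comment : String) : String :=
  String.ofList (unCommentGoA comment.toList s.toList false [])

-- ===== PORT B =====
-- B's loop: no flag; on '\\' look at the next character and decide immediately.
def unCommentGoB (cm : List Char) : List Char → List Char → List Char
  | [], out => out
  | [c], out =>
    if [c] = cm then out                  -- unescaped comment char: stop
    else if c = '\\' then out              -- trailing backslash is dropped
    else out ++ [c]
  | c :: d :: rest', out =>
    if [c] = cm then out                  -- unescaped comment char: stop
    else if c = '\\' then
      if [d] = cm then unCommentGoB cm rest' (out ++ [d])        -- escaped comment, consume both
      else unCommentGoB cm (d :: rest') (out ++ ['\\'])          -- lone backslash, emit it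
    else unCommentGoB cm (d :: rest') (out ++ [c])

def un_comment_alt (s : String) (comment : String) : String :=
  String.ofList (unCommentGoB comment.toList s.toList [])

-- ===== PRECONDITION & SPEC =====
def Spec_un_comment (s : String) (comment : String) (out : String) : Prop := out = un_comment_alt s comment
instance (s : String) (comment : String) (out : String) : Decidable (Spec_un_comment s comment out) := by unfold Spec_un_comment; infer_instance

-- ===== CLAIM (what is proved, stated in full; the proofs are below) =====
def Claim_equal_un_comment : Prop := ∀ (s : String) (comment : String), Dom_un_comment s comment → Spec_un_comment s comment (un_comment s comment)

-- ===== LEMMAS AND PROOFS =====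

theorem goB_cons (cm : List Char) (c : Char) (rest : List Char) (out : List Char) :
    unCommentGoB cm (c :: rest) out =
      if [c] = cm then out
      else if c = '\\' then
        match rest with
        | [] => out
        | d :: rest' =>
          if [d] = cm then unCommentGoB cm rest' (out ++ [d])
          else unCommentGoB cm rest (out ++ ['\\'])
      else unCommentGoB cm rest (out ++ [c]) := by
  cases rest <;> simp [unCommentGoB]

-- Main invariant (joint induction): with the flag clear A's loop equals B's loop, and with the
-- flag set A's loop equals B's loop run on a fresh leading backslash (provided '\' is not the comment).
theorem unCommentGo_eq (cm : List Char) (l : List Char) :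
    ∀ res : List Char,
      unCommentGoA cm l false res = unCommentGoB cm l res ∧
      (cm ≠ ['\\'] → unCommentGoA cm l true res = unCommentGoB cm ('\\' :: l) res) := by
  induction l with
  | nil =>
    intro res
    refine ⟨rfl, fun _ => ?_⟩
    simp [unCommentGoA, unCommentGoB]
  | cons c rest ih =>
    intro res
    constructor
    · -- flag clear
      by_cases hc : [c] = cm
      · rw [goB_cons]
        simp [unCommentGoA, hc]
      · by_cases he : c = '\\'
        · subst he
          have hcm : cm ≠ ['\\'] := fun h => hc h.symm
          have hA : unCommentGoA cm ('\\' :: rest) false res = unCommentGoA cm rest true res := by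
            simp [unCommentGoA, hc]
          rw [hA]
          exact (ih res).2 hcm
        · rw [goB_cons]
          simp [unCommentGoA, hc, he]
          exact (ih (res ++ [c])).1
    · -- flag set: B sees a fresh leading backslash
      intro hcm
      have hbs : ¬ (['\\'] = cm) := fun h => hcm h.symm
      by_cases hd : [c] = cm
      · -- escaped comment char; c ≠ '\\' since cm ≠ ['\\']
        have hce : c ≠ '\\' := by
          intro h; exact hcm (h ▸ hd).symm
        rw [goB_cons]
        simp [unCommentGoA, hd, hbs, hce]
        have := (ih (res ++ [c])).1
        rw [hd] at this
        exact this
      · by_cases he : c = '\\'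
        · subst he
          have hA : unCommentGoA cm ('\\' :: rest) true res
              = unCommentGoA cm rest true (res ++ ['\\']) := by
            simp [unCommentGoA, hd]
          have hB : unCommentGoB cm ('\\' :: '\\' :: rest) res
              = unCommentGoB cm ('\\' :: rest) (res ++ ['\\']) := by
            rw [goB_cons]
            simp [hbs]
          rw [hA, hB]
          exact (ih (res ++ ['\\'])).2 hcm
        · have hA : unCommentGoA cm (c :: rest) true res
              = unCommentGoA cm rest false (res ++ ['\\'] ++ [c]) := by
            simp [unCommentGoA, hd, he]
          have hB : unCommentGoB cm ('\\' :: c :: rest) res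
              = unCommentGoB cm rest (res ++ ['\\'] ++ [c]) := by
            rw [goB_cons]
            simp [hbs]
            rw [goB_cons]
            simp [hd, he]
          rw [hA, hB]
          exact (ih (res ++ ['\\'] ++ [c])).1

-- ===== VERDICT (by name: the statement is the Claim_ definition above) =====
theorem un_comment_spec : Claim_equal_un_comment := by
  intro s comment _
  unfold Spec_un_comment un_comment un_comment_alt
  rw [(unCommentGo_eq comment.toList s.toList []).1]
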